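-- pv_equiv track=rewrite | github.com/ahaandesai27/daa-lab | Theory/Divide and Conquer/karatsuba.py | karatsuba_multiplication
-- ===== SOURCE A (Python) =====
-- def karatsuba_multiplication(x: int, y: int) -> int:
--     """
--     Performs multiplication of two integers using the divide and conquer karatsuba algorithm.
--     """
--     if x < 10 or y < 10:
--         return x * y
--
--     m = min(
--         len(str(x)),
--         len(str(y))
--             )
--     m2 = m//2
--
--     high1, low1 = divmod(x, 10**m2)         # Equivalent to splitting in the middle
--     high2, low2 = divmod(y, 10**m2)
--
--     z0 = karatsuba_multiplication(low1, low2)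
--     z2 = karatsuba_multiplication(high1, high2)
--     z1 = karatsuba_multiplication(low1 + high1 , low2 + high2) - z2 - z0
--     # The function outputs low1*low2 + high1*low2 + high1*high2 + high2*low1
--     # from which we must subtract low1low2(z0) and high1high2(z2)
--
--     return z2*(10 ** (2*m2)) + z1*(10 ** m2) + z0
-- ===== SOURCE B (Python) =====
-- def karatsuba_multiplication(x: int, y: int) -> int:
--     """Grade-school long multiplication over decimal digits; same product as A."""
--     ax, ay = abs(x), abs(y)
--     total = 0
--     shift = 1
--     while ax > 0:
--         total += (ax % 10) * ay * shift
--         ax //= 10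
--         shift *= 10
--     return -total if (x < 0) != (y < 0) else total
-- ===== Notes on version B (the rewrite author's own statement) =====
-- stated objective: alternative
-- what changed: Replaces the recursive Karatsuba divide-and-conquer with an iterative grade-school long multiplication: one loop over the decimal digits of abs(x), adding shifted partial products into an accumulator, with the sign fixed at the end.
import Mathlib
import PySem

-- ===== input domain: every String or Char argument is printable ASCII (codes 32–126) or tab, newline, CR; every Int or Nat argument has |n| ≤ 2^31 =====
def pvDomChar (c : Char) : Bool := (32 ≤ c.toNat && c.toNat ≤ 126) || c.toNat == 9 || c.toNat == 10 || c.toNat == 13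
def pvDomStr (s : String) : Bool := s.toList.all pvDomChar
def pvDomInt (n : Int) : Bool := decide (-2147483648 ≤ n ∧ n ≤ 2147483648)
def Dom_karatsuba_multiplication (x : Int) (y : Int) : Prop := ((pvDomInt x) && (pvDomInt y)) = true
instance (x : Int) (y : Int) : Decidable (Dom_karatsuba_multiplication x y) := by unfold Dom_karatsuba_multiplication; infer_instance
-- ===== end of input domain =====

-- B replaces the Karatsuba recursion by an iterative grade-school digit loop; same product (alternative algorithm, not faster).
-- The lemmas before the ports are exactly those the ports' own termination proofs cite by name.

-- (length of Nat.toDigitsCore with a seed list = length with [] plus the seed's length)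
lemma pvTdcLenAppend (l : List Char) (f n : Nat) :
    (Nat.toDigitsCore 10 f n l).length = (Nat.toDigitsCore 10 f n []).length + l.length := by
  induction l with
  | nil => simp
  | cons c tl ih => rw [Nat.toDigitsCore_lens_eq 10 f n c tl, ih]; simp; omega

-- (value bound from digit-string length: n < 10^len, for sufficient fuel)
lemma pvTdcLtPow (f : Nat) : ∀ n : Nat, n < f → n < 10 ^ (Nat.toDigitsCore 10 f n []).length := by
  induction f with
  | zero => omega
  | succ f ih =>
    intro n hn
    simp only [Nat.toDigitsCore]
    by_cases h : n / 10 = 0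
    · rw [if_pos h]
      have : n < 10 := by omega
      simpa using this
    · rw [if_neg h]
      rw [pvTdcLenAppend [Nat.digitChar (n % 10)] f (n / 10)]
      have h10 : 10 ≤ n := by
        by_contra hc
        exact h (Nat.div_eq_of_lt (by omega))
      have hf : n / 10 < f := by
        have := Nat.div_lt_self (by omega : 0 < n) (by omega : 1 < 10)
        omega
      have ih' := ih (n / 10) hf
      have hmod : n % 10 < 10 := Nat.mod_lt _ (by omega)
      have hdm : n = 10 * (n / 10) + n % 10 := (Nat.div_add_mod n 10).symm ▸ by omega
      calc n = 10 * (n / 10) + n % 10 := by omega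
    _ < 10 * (n / 10 + 1) := by omega
    _ ≤ 10 * 10 ^ (Nat.toDigitsCore 10 f (n / 10) []).length := by
          have : n / 10 + 1 ≤ 10 ^ (Nat.toDigitsCore 10 f (n / 10) []).length := by omega
          exact Nat.mul_le_mul_left 10 this
    _ = 10 ^ ((Nat.toDigitsCore 10 f (n / 10) []).length + 1) := by rw [Nat.pow_succ]; ring
    _ = 10 ^ ((Nat.toDigitsCore 10 f (n / 10) []).length + [Nat.digitChar (n % 10)].length) := by
          simp

lemma pvToDigitsLtPow (n : Nat) : n < 10 ^ (Nat.toDigits 10 n).length :=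
  pvTdcLtPow (n + 1) n (by omega)

lemma pvLenGeTwo (n : Nat) (hn : 10 ≤ n) : 2 ≤ (Nat.toDigits 10 n).length := by
  by_contra h
  have h1 := pvToDigitsLtPow n
  have hle : (Nat.toDigits 10 n).length ≤ 1 := by omega
  have h2 : (10:Nat) ^ (Nat.toDigits 10 n).length ≤ 10 ^ 1 := Nat.pow_le_pow_right (by omega) hle
  omega

lemma pvPowLeOfLtLen (n m2 : Nat) (hn : 1 ≤ n) (h : m2 < (Nat.toDigits 10 n).length) :
    10 ^ m2 ≤ n := by
  by_contra hc
  rcases Nat.eq_zero_or_pos m2 with h0 | hpos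
  · subst h0; simp at hc; omega
  · exact absurd (Nat.toDigits_length 10 n m2 hpos (by omega)) (by omega)

lemma pvToCharsLen (x : Int) (hx : 0 ≤ x) :
    (PySem.Int.toChars x).length = (Nat.toDigits 10 x.toNat).length := by
  simp [PySem.Int.toChars, Int.not_lt.mpr hx]

-- the key size facts used by Port A's termination proof (cited by name in decreasing_by)
lemma pvKarKey (x y : Int) (hx : 10 ≤ x) (hy : 10 ≤ y) :
    10 ≤ (10:Int) ^ (min (PySem.Int.toChars x).length (PySem.Int.toChars y).length / 2)
    ∧ (10:Int) ^ (min (PySem.Int.toChars x).length (PySem.Int.toChars y).length / 2) ≤ x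
    ∧ (10:Int) ^ (min (PySem.Int.toChars x).length (PySem.Int.toChars y).length / 2) ≤ y := by
  have hx0 : (0:Int) ≤ x := by omega
  have hy0 : (0:Int) ≤ y := by omega
  rw [pvToCharsLen x hx0, pvToCharsLen y hy0]
  set lx := (Nat.toDigits 10 x.toNat).length with hlx
  set ly := (Nat.toDigits 10 y.toNat).length with hly
  have h2x : 2 ≤ lx := pvLenGeTwo _ (by omega)
  have h2y : 2 ≤ ly := pvLenGeTwo _ (by omega)
  set m2 := min lx ly / 2 with hm2
  have hm2x : m2 < lx := by omega
  have hm2y : m2 < ly := by omega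
  have hm21 : 1 ≤ m2 := by omega
  have hpx : 10 ^ m2 ≤ x.toNat := pvPowLeOfLtLen _ _ (by omega) hm2x
  have hpy : 10 ^ m2 ≤ y.toNat := pvPowLeOfLtLen _ _ (by omega) hm2y
  have h10 : (10:Nat) ≤ 10 ^ m2 := by
    calc (10:Nat) = 10 ^ 1 := by norm_num
    _ ≤ 10 ^ m2 := Nat.pow_le_pow_right (by omega) hm21
  refine ⟨?_, ?_, ?_⟩ <;> [skip; skip; skip]
  · exact_mod_cast h10
  · calc ((10:Int)) ^ m2 = ((10 ^ m2 : Nat) : Int) := by push_cast; ring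
    _ ≤ (x.toNat : Int) := by exact_mod_cast hpx
    _ = x := by omega
  · calc ((10:Int)) ^ m2 = ((10 ^ m2 : Nat) : Int) := by push_cast; ring
    _ ≤ (y.toNat : Int) := by exact_mod_cast hpy
    _ = y := by omega

-- bounds for a divmod split of x by p, 10 ≤ p ≤ x (cited by name in decreasing_by)
lemma pvSplitBounds (x p : Int) (hp : 10 ≤ p) (hpx : p ≤ x) :
    0 ≤ PySem.Int.mod x p ∧ PySem.Int.mod x p < x
    ∧ 0 ≤ PySem.Int.floordiv x p ∧ PySem.Int.floordiv x p < x
    ∧ PySem.Int.mod x p + PySem.Int.floordiv x p < x := by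
  have hp0 : (0:Int) < p := by omega
  have hmn := PySem.Int.mod_nonneg x hp0
  have hml := PySem.Int.mod_lt x hp0
  have hd1 : 1 ≤ PySem.Int.floordiv x p := by
    rw [PySem.Int.le_floordiv_iff_mul_le hp0]; omega
  have hdm := PySem.Int.floordiv_mul_add_mod x p
  have hdlt : PySem.Int.floordiv x p < x := by nlinarith
  refine ⟨hmn, by omega, by omega, hdlt, ?_⟩
  nlinarith

-- ===== PORT A =====
def karatsuba_multiplication (x : Int) (y : Int) : Int :=
  if x < 10 ∨ y < 10 then x * y
  else
    -- m = min(len(str(x)), len(str(y))); here x,y ≥ 10, so m and m2 = m // 2 are Nat and // is Nat division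
    let m : Nat := min (PySem.Int.toChars x).length (PySem.Int.toChars y).length
    let m2 : Nat := m / 2
    let high1 := PySem.Int.floordiv x (10 ^ m2)
    let low1 := PySem.Int.mod x (10 ^ m2)
    let high2 := PySem.Int.floordiv y (10 ^ m2)
    let low2 := PySem.Int.mod y (10 ^ m2)
    let z0 := karatsuba_multiplication low1 low2
    let z2 := karatsuba_multiplication high1 high2
    let z1 := karatsuba_multiplication (low1 + high1) (low2 + high2) - z2 - z0
    z2 * 10 ^ (2 * m2) + z1 * 10 ^ m2 + z0
termination_by x.toNat
decreasing_by
  all_goals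
    rename_i h
    rw [not_or, not_lt, not_lt] at h
    obtain ⟨hx, hy⟩ := h
    obtain ⟨hp10, hpx, _⟩ := pvKarKey x y hx hy
    obtain ⟨_, h2, _, h4, h5⟩ := pvSplitBounds x _ hp10 hpx
    omega

-- ===== PORT B =====
-- the while loop of Source B: accumulate (ax % 10) * ay * shift, then ax //= 10, shift *= 10
def pvAltLoop (ax ay shift total : Int) : Int :=
  if 0 < ax then
    pvAltLoop (PySem.Int.floordiv ax 10) ay (shift * 10) (total + PySem.Int.mod ax 10 * ay * shift)
  else total
termination_by ax.toNat
decreasing_by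
  rename_i h
  have h2 : PySem.Int.floordiv ax 10 < ax := by
    rw [PySem.Int.floordiv_lt_iff_lt_mul (by omega)]; nlinarith
  have _hnn : (0:Int) ≤ PySem.Int.floordiv ax 10 := by
    rw [PySem.Int.le_floordiv_iff_mul_le (by omega)]; omega
  omega

def karatsuba_multiplication_alt (x : Int) (y : Int) : Int :=
  let total := pvAltLoop |x| |y| 1 0
  if (x < 0) ≠ (y < 0) then -total else total

-- ===== PRECONDITION & SPEC =====
def Spec_karatsuba_multiplication (x : Int) (y : Int) (out : Int) : Prop := out = karatsuba_multiplication_alt x y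
instance (x : Int) (y : Int) (out : Int) : Decidable (Spec_karatsuba_multiplication x y out) := by unfold Spec_karatsuba_multiplication; infer_instance

-- ===== CLAIM (what is proved, stated in full; the proofs are below) =====
def Claim_equal_karatsuba_multiplication : Prop := ∀ (x : Int) (y : Int), Dom_karatsuba_multiplication x y → Spec_karatsuba_multiplication x y (karatsuba_multiplication x y)

-- ===== LEMMAS AND PROOFS =====

lemma pvKarEq (x y : Int) : karatsuba_multiplication x y = x * y := by
  fun_induction karatsuba_multiplication x y with
  | case1 x y h => rfl
  | case2 x y h m m2 high1 low1 high2 low2 z0 z2 z1 ih0 _ ihh _ ih1 =>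
    have e0 : z0 = low1 * low2 := ih0
    have e2 : z2 = high1 * high2 := ihh
    have e1 : z1 = (low1 + high1) * (low2 + high2) - z2 - z0 := by
      show karatsuba_multiplication (low1 + high1) (low2 + high2) - z2 - z0 = _
      rw [ih1]
    have hx : high1 * 10 ^ m2 + low1 = x := PySem.Int.floordiv_mul_add_mod x (10 ^ m2)
    have hy : high2 * 10 ^ m2 + low2 = y := PySem.Int.floordiv_mul_add_mod y (10 ^ m2)
    rw [e1, e2, e0, ← hx, ← hy]
    ring

lemma pvAltLoopEq (ax ay shift total : Int) (h : 0 ≤ ax) :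
    pvAltLoop ax ay shift total = total + ax * ay * shift := by
  fun_induction pvAltLoop ax ay shift total with
  | case1 ax shift total hpos ih =>
    have hd := PySem.Int.floordiv_mul_add_mod ax 10
    have hnn : 0 ≤ PySem.Int.floordiv ax 10 := by
      rw [PySem.Int.le_floordiv_iff_mul_le (by omega)]; omega
    rw [ih hnn]
    linear_combination (ay * shift) * hd
  | case2 ax shift total hpos =>
    have hz : ax = 0 := by omega
    rw [hz]; ring

lemma pvAltEq (x y : Int) : karatsuba_multiplication_alt x y = x * y := by
  unfold karatsuba_multiplication_alt
  rw [pvAltLoopEq _ _ _ _ (abs_nonneg x)]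
  by_cases hx : x < 0 <;> by_cases hy : y < 0 <;>
    simp [hx, hy, abs_of_neg, abs_of_nonneg, Int.not_lt.mp]

-- ===== VERDICT (by name: the statement is the Claim_ definition above) =====
theorem karatsuba_multiplication_spec : Claim_equal_karatsuba_multiplication := by
  intro x y _
  unfold Spec_karatsuba_multiplication
  rw [pvKarEq, pvAltEq]
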